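-- pv_equiv track=rewrite | github.com/cmpeavlerjr72/kalshi_cbb_trading | fetch_kalshi_ledger.py | group_fills_by_order
-- ===== SOURCE A (Python) =====
-- from typing import List, Dict, Any, Optional
--
-- def group_fills_by_order(fills: List[Dict]) -> Dict[str, List[Dict]]:
--     """Group fills by order_id"""
--     grouped = {}
--     for fill in fills:
--         oid = fill.get("order_id", "unknown")
--         if oid not in grouped:
--             grouped[oid] = []
--         grouped[oid].append(fill)
--     return grouped
-- ===== SOURCE B (Python) =====
-- def group_fills_by_order(fills):
--     """Group fills by order_id"""
--     ids = [f.get("order_id", "unknown") for f in fills]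
--     return {k: [f for f, i in zip(fills, ids) if i == k] for k in dict.fromkeys(ids)}
-- ===== Notes on version B (the rewrite author's own statement) =====
-- stated objective: alternative
-- what changed: B replaces A's incremental dict-building loop (check membership, insert empty list, append) by a two-phase declarative form: extract all keys once, deduplicate them with dict.fromkeys, and build the result as a comprehension that collects each group by filtering the zipped (fill, key) list.
import Mathlib
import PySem

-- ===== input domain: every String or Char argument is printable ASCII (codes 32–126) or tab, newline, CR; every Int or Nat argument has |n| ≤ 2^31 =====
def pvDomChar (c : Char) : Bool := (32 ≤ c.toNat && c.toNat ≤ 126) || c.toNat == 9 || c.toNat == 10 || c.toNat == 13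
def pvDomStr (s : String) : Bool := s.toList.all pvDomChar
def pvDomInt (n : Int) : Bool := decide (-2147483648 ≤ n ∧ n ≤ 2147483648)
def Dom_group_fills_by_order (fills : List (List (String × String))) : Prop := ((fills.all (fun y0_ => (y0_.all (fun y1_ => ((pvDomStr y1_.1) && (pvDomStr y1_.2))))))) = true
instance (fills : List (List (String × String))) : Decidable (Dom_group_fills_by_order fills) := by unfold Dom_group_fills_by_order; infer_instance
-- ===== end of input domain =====

-- B groups by first extracting and deduplicating all keys, then filtering per key,
-- instead of A's incremental dict-insertion loop; objective: alternative decomposition,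
-- same return value (return-value equivalence; neither version mutates its argument).

-- fill.get("order_id", "unknown") on a dict given as an association list
def pvFillKey (fill : List (String × String)) : String :=
  (PySem.Dict.mk fill).getD "order_id" "unknown"

-- ===== PORT A =====
def group_fills_by_order (fills : List (List (String × String))) : List (String × List (List (String × String))) :=
  (fills.foldl
    (fun grouped fill =>
      let oid := pvFillKey fill
      let grouped := if grouped.contains oid then grouped else grouped.insert oid []
      -- grouped[oid].append(fill)
      grouped.modify oid [] (fun v => v ++ [fill]))
    PySem.Dict.empty).items

-- ===== PORT B =====
def group_fills_by_order_alt (fills : List (List (String × String))) : List (String × List (List (String × String))) :=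
  let ids := fills.map pvFillKey
  (PySem.List.dedup ids).map
    (fun k => (k, ((fills.zip ids).filter (fun p => p.2 == k)).map (fun p => p.1)))

-- ===== PRECONDITION & SPEC =====
def Spec_group_fills_by_order (fills : List (List (String × String))) (out : List (String × List (List (String × String)))) : Prop := out = group_fills_by_order_alt fills
instance (fills : List (List (String × String))) (out : List (String × List (List (String × String)))) : Decidable (Spec_group_fills_by_order fills out) := by unfold Spec_group_fills_by_order; infer_instance

-- ===== CLAIM (what is proved, stated in full; the proofs are below) =====
def Claim_equal_group_fills_by_order : Prop := ∀ (fills : List (List (String × String))), Dom_group_fills_by_order fills → Spec_group_fills_by_order fills (group_fills_by_order fills)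

-- ===== LEMMAS AND PROOFS =====

-- A's loop body (test-membership, seed with [], then append) is one Dict.modify.
theorem pv_step_eq (d : PySem.Dict String (List (List (String × String)))) (fill : List (String × String)) :
    (let oid := pvFillKey fill
     let d' := if d.contains oid then d else d.insert oid []
     d'.modify oid [] (fun v => v ++ [fill]))
    = d.modify (pvFillKey fill) [] (fun v => v ++ [fill]) := by
  by_cases h : d.contains (pvFillKey fill)
  · simp [h]
  · simp only [Bool.not_eq_true] at h
    simp only [h, Bool.false_eq_true, if_false, PySem.Dict.modify,
      PySem.Dict.insert_insert_self, PySem.Dict.getD_insert_self,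
      PySem.Dict.getD_of_not_contains (h := h)]

theorem pv_getD_foldl (fills : List (List (String × String))) (c : String) :
    ((fills.foldl (fun d fill => d.modify (pvFillKey fill) [] (fun v => v ++ [fill]))
        PySem.Dict.empty).getD c [])
    = ((fills.zip (fills.map pvFillKey)).filter (fun p => p.2 == c)).map (fun p => p.1) := by
  have hm : fills.foldl (fun d fill => d.modify (pvFillKey fill) [] (fun v => v ++ [fill]))
        PySem.Dict.empty
      = (fills.map (fun f => (pvFillKey f, f))).foldl
          (fun d p => d.modify p.1 [] (fun v => v ++ [p.2])) PySem.Dict.empty := by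
    rw [List.foldl_map]
  rw [hm, PySem.Dict.getD_foldl_modify_append]
  have hz : fills.zip (fills.map pvFillKey) = fills.map (fun f => (f, pvFillKey f)) := by
    clear hm
    induction fills with
    | nil => rfl
    | cons f t ih => simpa using ih
  rw [hz]
  simp [PySem.Dict.getD_empty, List.filter_map, Function.comp_def]

theorem group_fills_eq (fills : List (List (String × String))) :
    group_fills_by_order fills = group_fills_by_order_alt fills := by
  unfold group_fills_by_order group_fills_by_order_alt
  have hstep : (fun (grouped : PySem.Dict String (List (List (String × String)))) fill =>
      let oid := pvFillKey fill
      let grouped := if grouped.contains oid then grouped else grouped.insert oid []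
      grouped.modify oid [] (fun v => v ++ [fill]))
      = (fun d fill => d.modify (pvFillKey fill) [] (fun v => v ++ [fill])) := by
    funext d fill; exact pv_step_eq d fill
  rw [hstep]
  set d := fills.foldl (fun d fill => d.modify (pvFillKey fill) [] (fun v => v ++ [fill]))
      PySem.Dict.empty with hd
  have hkeys : d.keys = PySem.List.dedup (fills.map pvFillKey) := by
    rw [hd, PySem.Dict.keys_foldl_modify_key fills pvFillKey [] (fun _ x v => v ++ [x])]
    rw [PySem.List.dedup_eq_ofList]
    simp [PySem.Dict.keys_empty, PySem.Set.update_nil_left]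
  have hnd : d.keys.Nodup := by
    rw [hd]
    exact PySem.Dict.nodup_keys_foldl_modify_key fills pvFillKey [] (fun _ x v => v ++ [x])
      PySem.Dict.empty (by simp [PySem.Dict.keys_empty])
  rw [PySem.Dict.items_eq_map_keys d hnd [], hkeys]
  exact List.map_congr_left (fun k _ => by rw [hd, pv_getD_foldl])

-- ===== VERDICT (by name: the statement is the Claim_ definition above) =====
theorem group_fills_by_order_spec : Claim_equal_group_fills_by_order := by
  intro fills _
  unfold Spec_group_fills_by_order
  exact group_fills_eq fills
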